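-- pv_equiv track=rewrite | github.com/wmaxlloyd/9dt-e2e-test-framework | src/utils/game_scenario_utilities.py | generate_game_board_from_game
-- ===== SOURCE A (Python) =====
-- from typing import List, TYPE_CHECKING
--
-- def generate_game_board_from_game(game_board_height: int, game_board_width: int, game: List[int]) -> List[List[str]]:
-- 	"""Starts with an empty board (of "0"'s) and fills in appropriate player token as it iterates through game"""
-- 	generate_empty_game_board_row = lambda: ["0"] * game_board_width
-- 	game_board = [generate_empty_game_board_row() for i in range(game_board_height)]
-- 	token_height_index_in_row = [game_board_height - 1] * game_board_width
-- 	for (index, column) in enumerate(game):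
-- 		column_index = column - 1
-- 		player = "1" if index % 2 == 0 else "2"
-- 		game_board[token_height_index_in_row[column_index]][column_index] = player
-- 		token_height_index_in_row[column_index] -= 1
-- 	return game_board
-- ===== SOURCE B (Python) =====
-- def generate_game_board_from_game(game_board_height, game_board_width, game):
--     """Bucket the moves per column, then fill each column in from the bottom up."""
--     columns = {}
--     for index, column in enumerate(game):
--         columns.setdefault(column - 1, []).append("1" if index % 2 == 0 else "2")
--     game_board = [["0"] * game_board_width for _ in range(game_board_height)]
--     for column_index, tokens in columns.items():
--         for k, player in enumerate(tokens):
--             game_board[game_board_height - 1 - k][column_index] = player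
--     return game_board
-- ===== Notes on version B (the rewrite author's own statement) =====
-- stated objective: alternative
-- what changed: A simulates the drops in one interleaved pass, mutating a per-column height-pointer array as it writes into the board; B instead first buckets the moves into an insertion-ordered dict (column index -> list of player tokens) and then fills the empty board column by column from the bottom up. Pre_ additionally excludes games that play both spellings col<=0 and col+w of the same physical column, where A's shared height counter across Python's negative-index aliasing and B's separate buckets are equally accidental behaviours on out-of-board column numbers.
-- outside the precondition, e.g. on generate_game_board_from_game(2, 2, [0, 2]): A returns [['0', '2'], ['0', '1']], B returns [['0', '0'], ['0', '2']]
import Mathlib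
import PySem

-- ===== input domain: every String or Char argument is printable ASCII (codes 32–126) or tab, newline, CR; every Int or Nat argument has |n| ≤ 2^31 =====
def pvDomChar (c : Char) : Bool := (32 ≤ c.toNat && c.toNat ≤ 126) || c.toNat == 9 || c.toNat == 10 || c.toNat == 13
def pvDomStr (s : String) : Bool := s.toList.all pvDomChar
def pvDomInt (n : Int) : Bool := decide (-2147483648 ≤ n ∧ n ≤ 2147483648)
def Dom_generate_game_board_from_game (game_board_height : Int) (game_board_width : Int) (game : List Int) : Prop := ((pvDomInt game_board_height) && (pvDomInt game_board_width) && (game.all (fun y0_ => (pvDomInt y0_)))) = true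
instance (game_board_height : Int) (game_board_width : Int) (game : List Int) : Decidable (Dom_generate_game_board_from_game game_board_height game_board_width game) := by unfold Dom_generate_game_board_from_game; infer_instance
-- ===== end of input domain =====

-- B rebuilds the board in two phases (bucket the moves per column into an ordered dict,
-- then fill each column bottom-up) instead of A's interleaved simulation over a mutable
-- height-pointer array; same cost, different decomposition (objective: alternative).

-- ===== PORT A =====
def generate_game_board_from_game (game_board_height : Int) (game_board_width : Int) (game : List Int) : List (List String) :=
  let game_board := List.replicate game_board_height.toNat (List.replicate game_board_width.toNat "0")
  let token_height_index_in_row := List.replicate game_board_width.toNat (game_board_height - 1)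
  let res := (PySem.List.enumerate game 0).foldl
    (fun (st : List (List String) × List Int) x =>
      let column_index := x.2 - 1
      let player := if PySem.Int.mod x.1 2 = 0 then "1" else "2"
      let ti := PySem.List.pyGetD st.2 column_index 0
      let row := PySem.List.pyGetD st.1 ti []
      (PySem.List.pySetD st.1 ti (PySem.List.pySetD row column_index player),
       PySem.List.pySetD st.2 column_index (ti - 1)))
    (game_board, token_height_index_in_row)
  res.1

-- ===== PORT B =====
def generate_game_board_from_game_alt (game_board_height : Int) (game_board_width : Int) (game : List Int) : List (List String) :=
  let columns := (PySem.List.enumerate game 0).foldl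
    (fun (d : PySem.Dict Int (List String)) x =>
      d.modify (x.2 - 1) [] (· ++ [if PySem.Int.mod x.1 2 = 0 then "1" else "2"]))
    PySem.Dict.empty
  let game_board := List.replicate game_board_height.toNat (List.replicate game_board_width.toNat "0")
  columns.items.foldl
    (fun bd ct =>
      (PySem.List.enumerate ct.2 0).foldl
        (fun bd2 kp =>
          PySem.List.pySetD bd2 (game_board_height - 1 - kp.1)
            (PySem.List.pySetD (PySem.List.pyGetD bd2 (game_board_height - 1 - kp.1) []) ct.1 kp.2))
        bd)
    game_board

-- ===== PRECONDITION & SPEC =====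
-- Pre_ holds where the Python A returns normally (every move's column resolves, via
-- Python's negative indexing, to a valid index of the width-sized lists, and no physical
-- column receives more than 2*height tokens — beyond that A raises IndexError) EXCEPT
-- that it also excludes games playing both spellings col ≤ 0 and col + width of the same
-- physical column: there Python's negative-index aliasing makes A share one height
-- counter between the two spellings while B stacks each spelling separately — an
-- unspecified out-of-board corner where either behaviour is equally defensible.
def Pre_generate_game_board_from_game (game_board_height : Int) (game_board_width : Int) (game : List Int) : Prop :=
  (∀ col ∈ game, (1 - game_board_width ≤ col ∧ col ≤ game_board_width) ∧
    ((game.countP (fun c => PySem.Int.mod (c - 1) game_board_width == PySem.Int.mod (col - 1) game_board_width) : Int) ≤ 2 * game_board_height)) ∧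
  (∀ col ∈ game, col ≤ 0 → (col + game_board_width) ∉ game)
instance (game_board_height : Int) (game_board_width : Int) (game : List Int) : Decidable (Pre_generate_game_board_from_game game_board_height game_board_width game) := by unfold Pre_generate_game_board_from_game; infer_instance

def pvWitness_generate_game_board_from_game : Int × Int × List Int := (1, 2, [1, 2, 1])

def Spec_generate_game_board_from_game (game_board_height : Int) (game_board_width : Int) (game : List Int) (out : List (List String)) : Prop := out = generate_game_board_from_game_alt game_board_height game_board_width game
instance (game_board_height : Int) (game_board_width : Int) (game : List Int) (out : List (List String)) : Decidable (Spec_generate_game_board_from_game game_board_height game_board_width game out) := by unfold Spec_generate_game_board_from_game; infer_instance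

-- ===== CLAIM (what is proved, stated in full; the proofs are below) =====
def Claim_equal_generate_game_board_from_game : Prop := ∀ (game_board_height : Int) (game_board_width : Int) (game : List Int), Dom_generate_game_board_from_game game_board_height game_board_width game → Pre_generate_game_board_from_game game_board_height game_board_width game → Spec_generate_game_board_from_game game_board_height game_board_width game (generate_game_board_from_game game_board_height game_board_width game)

-- ===== LEMMAS AND PROOFS =====

-- the resolved (mod-width) column of a move, the player token of a move, one board-cell write
def pvKey (w col : Int) : Int := PySem.Int.mod (col - 1) w
def pvPly (i : Int) : String := if PySem.Int.mod i 2 = 0 then "1" else "2"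
def pvWr (bd : List (List String)) (r c : Int) (p : String) : List (List String) :=
  PySem.List.pySetD bd r (PySem.List.pySetD (PySem.List.pyGetD bd r []) c p)
-- canonical per-move step on (board, per-column token count)
def pvStep (h w : Int) (s : List (List String) × (Int → Int)) (x : Int × Int) :
    List (List String) × (Int → Int) :=
  let c := pvKey w x.2
  (pvWr s.1 (PySem.Int.mod (h - 1 - s.2 c) h) c (pvPly x.1),
   fun c' => if c' = c then s.2 c + 1 else s.2 c')
-- A's pointer list as a function of the count table
def pvTOf (h w : Int) (cnt : Int → Int) : List Int :=
  (PySem.List.pyRange 0 w 1).map (fun j => h - 1 - cnt j)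
-- A's loop body, named (identical to the lambda in the port of A)
def pvStepA (s : List (List String) × List Int) (x : Int × Int) :
    List (List String) × List Int :=
  let column_index := x.2 - 1
  let player := if PySem.Int.mod x.1 2 = 0 then "1" else "2"
  let ti := PySem.List.pyGetD s.2 column_index 0
  let row := PySem.List.pyGetD s.1 ti []
  (PySem.List.pySetD s.1 ti (PySem.List.pySetD row column_index player),
   PySem.List.pySetD s.2 column_index (ti - 1))
-- the canonical fill step at an already-resolved column (row index taken mod height)
def pvFill (h : Int) (c : Int) (bd : List (List String)) (kp : Int × String) : List (List String) :=
  pvWr bd (PySem.Int.mod (h - 1 - kp.1) h) c kp.2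
-- B's inner loop body, named (identical to the inner lambda in the port of B)
def pvFill' (h : Int) (c : Int) (bd : List (List String)) (kp : Int × String) : List (List String) :=
  pvWr bd (h - 1 - kp.1) c kp.2
-- a write with already-resolved non-negative indices, as plain List.set
def pvWrN (bd : List (List String)) (n m : Nat) (p : String) : List (List String) :=
  bd.set n ((bd.getD n []).set m p)
-- board shape: h rows of width w
def pvShape (h w : Int) (bd : List (List String)) : Prop :=
  bd.length = h.toNat ∧ ∀ row ∈ bd, row.length = w.toNat

theorem pvWr_nonneg (bd : List (List String)) {r c : Int} (p : String)
    (hr : 0 ≤ r) (hc : 0 ≤ c) : pvWr bd r c p = pvWrN bd r.toNat c.toNat p := by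
  unfold pvWr pvWrN
  rw [PySem.List.pySetD_of_nonneg _ _ hr, PySem.List.pySetD_of_nonneg _ _ hc,
      PySem.List.pyGetD_of_nonneg bd _ hr]

theorem pv_mod_resolve {i n : Int} (h0 : 0 < n) (h1 : -n ≤ i) (h2 : i < n) :
    PySem.Int.mod i n = if 0 ≤ i then i else i + n := by
  rw [PySem.Int.mod_eq_emod_of_pos h0]
  split_ifs with h
  · exact Int.emod_eq_of_lt h h2
  · have : i % n = (i + n * 1) % n := by rw [Int.add_mul_emod_self_left]
    rw [this, mul_one]
    exact Int.emod_eq_of_lt (by omega) (by omega)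

theorem pvIdx_mod {i n : Int} (xl : Nat) (hl : (xl : Int) = n) (h1 : -n ≤ i) (h2 : i < n) :
    PySem.List.pyIdx? xl i = PySem.List.pyIdx? xl (PySem.Int.mod i n) := by
  have h0 : 0 < n := by omega
  rw [pv_mod_resolve h0 h1 h2]
  split_ifs with h
  · rfl
  · simp only [PySem.List.pyIdx?]
    rw [if_neg (by omega), if_pos (by omega), if_pos (by omega), if_pos (by omega)]
    congr 1
    omega

theorem pvGetD_mod {α : Type} (xs : List α) {i n : Int} (d : α)
    (hl : (xs.length : Int) = n) (h1 : -n ≤ i) (h2 : i < n) :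
    PySem.List.pyGetD xs i d = PySem.List.pyGetD xs (PySem.Int.mod i n) d := by
  simp only [PySem.List.pyGetD, PySem.List.pyGet?, pvIdx_mod xs.length hl h1 h2]

theorem pvSetD_mod {α : Type} (xs : List α) {i n : Int} (v : α)
    (hl : (xs.length : Int) = n) (h1 : -n ≤ i) (h2 : i < n) :
    PySem.List.pySetD xs i v = PySem.List.pySetD xs (PySem.Int.mod i n) v := by
  simp only [PySem.List.pySetD, PySem.List.pySet?, pvIdx_mod xs.length hl h1 h2]

theorem pv_getD_set_self {α : Type} (l : List α) (n : Nat) (v d : α) (h : n < l.length) :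
    (l.set n v).getD n d = v := by
  rw [List.getD_eq_getElem?_getD, List.getElem?_set_self', List.getElem?_eq_getElem h]
  rfl

theorem pv_getD_set_ne {α : Type} (l : List α) {n j : Nat} (v d : α) (h : n ≠ j) :
    (l.set n v).getD j d = l.getD j d := by
  rw [List.getD_eq_getElem?_getD, List.getElem?_set_ne h, List.getD_eq_getElem?_getD]

theorem pvWrN_comm (bd : List (List String)) (n1 n2 m1 m2 : Nat) (p1 p2 : String)
    (hm : m1 ≠ m2) : pvWrN (pvWrN bd n1 m1 p1) n2 m2 p2 = pvWrN (pvWrN bd n2 m2 p2) n1 m1 p1 := by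
  unfold pvWrN
  by_cases hn : n1 = n2
  · subst hn
    by_cases hlt : n1 < bd.length
    · rw [pv_getD_set_self _ _ _ _ hlt, pv_getD_set_self _ _ _ _ hlt, List.set_set, List.set_set,
          List.set_comm _ _ hm]
    · rw [List.set_eq_of_length_le (by simp only [List.length_set]; omega),
          List.set_eq_of_length_le (by omega),
          List.set_eq_of_length_le (by simp only [List.length_set]; omega),
          List.set_eq_of_length_le (by omega)]
  · rw [pv_getD_set_ne _ _ _ hn, pv_getD_set_ne _ _ _ (by omega : n2 ≠ n1),
        List.set_comm _ _ hn]

theorem pvWr_comm (bd : List (List String)) {r1 r2 c1 c2 : Int} (p1 p2 : String)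
    (hr1 : 0 ≤ r1) (hr2 : 0 ≤ r2) (hc1 : 0 ≤ c1) (hc2 : 0 ≤ c2) (hne : c1 ≠ c2) :
    pvWr (pvWr bd r1 c1 p1) r2 c2 p2 = pvWr (pvWr bd r2 c2 p2) r1 c1 p1 := by
  rw [pvWr_nonneg bd p1 hr1 hc1, pvWr_nonneg _ p2 hr2 hc2,
      pvWr_nonneg bd p2 hr2 hc2, pvWr_nonneg _ p1 hr1 hc1]
  exact pvWrN_comm bd _ _ _ _ p1 p2 (by omega)

theorem pvStep_comm (h w : Int) (hh : 0 < h) (hw : 0 < w) (s : List (List String) × (Int → Int))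
    (x y : Int × Int) (hne : pvKey w x.2 ≠ pvKey w y.2) :
    pvStep h w (pvStep h w s x) y = pvStep h w (pvStep h w s y) x := by
  unfold pvStep
  simp only
  rw [if_neg hne, if_neg (Ne.symm hne)]
  refine Prod.ext ?_ ?_
  · dsimp only
    exact pvWr_comm s.1 _ _ (PySem.Int.mod_nonneg _ hh) (PySem.Int.mod_nonneg _ hh)
      (PySem.Int.mod_nonneg _ hw) (PySem.Int.mod_nonneg _ hw) hne
  · dsimp only
    funext c'
    by_cases h1 : c' = pvKey w y.2 <;> by_cases h2 : c' = pvKey w x.2 <;>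
      simp [h1, h2, hne, Ne.symm hne]

theorem pv_dedup_append {α : Type} [BEq α] [LawfulBEq α] (m : List α) (k : α) :
    PySem.List.dedup (m ++ [k]) = if k ∈ m then PySem.List.dedup m else PySem.List.dedup m ++ [k] := by
  simp only [PySem.List.dedup, PySem.Set.ofList, List.foldl_append, List.foldl_cons, List.foldl_nil]
  rw [show List.foldl PySem.Set.add PySem.Set.empty m = PySem.Set.ofList m from rfl]
  rw [PySem.Set.add]
  have hc : (PySem.Set.ofList m).contains k = true ↔ k ∈ m := by
    rw [PySem.Set.contains, List.contains_iff_mem]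
    exact PySem.Set.mem_ofList m k
  split_ifs with h1 h2 h2 <;> try rfl
  · exact absurd (hc.mp h1) h2
  · exact absurd (hc.mpr h2) h1

theorem pv_foldl_groups_congr {σ κ : Type} (G1 G2 : σ → κ → σ) (kt : List κ)
    (h : ∀ s k, k ∈ kt → G1 s k = G2 s k) (s : σ) : kt.foldl G1 s = kt.foldl G2 s := by
  induction kt generalizing s with
  | nil => rfl
  | cons k' kt' ih =>
    simp only [List.foldl_cons]
    rw [h s k' List.mem_cons_self]
    exact ih (fun s0 b hb => h s0 b (List.mem_cons_of_mem k' hb)) _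

theorem pv_foldl_comm_out {σ α κ : Type} (f : σ → α → σ) (key : α → κ)
    (hcomm : ∀ s x y, key x ≠ key y → f (f s x) y = f (f s y) x)
    (x : α) (l : List α) (hx : ∀ a ∈ l, key a ≠ key x) (s : σ) :
    l.foldl f (f s x) = f (l.foldl f s) x := by
  induction l generalizing s with
  | nil => rfl
  | cons a t ih =>
    simp only [List.foldl_cons]
    rw [hcomm s x a (Ne.symm (hx a List.mem_cons_self))]
    exact ih (fun b hb => hx b (List.mem_cons_of_mem a hb)) (f s a)

theorem pv_groups_comm_out {σ α κ : Type} [BEq κ] [LawfulBEq κ] (f : σ → α → σ) (key : α → κ)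
    (hcomm : ∀ s x y, key x ≠ key y → f (f s x) y = f (f s y) x)
    (x : α) (l : List α) (kt : List κ) (hkt : ∀ k ∈ kt, k ≠ key x) (s : σ) :
    kt.foldl (fun s k => (l.filter (fun a => key a == k)).foldl f s) (f s x)
      = f (kt.foldl (fun s k => (l.filter (fun a => key a == k)).foldl f s) s) x := by
  induction kt generalizing s with
  | nil => rfl
  | cons k' kt' ih =>
    simp only [List.foldl_cons]
    rw [pv_foldl_comm_out f key hcomm x (l.filter (fun a => key a == k'))
      (fun a ha => by
        have hk : key a = k' := by simpa using List.of_mem_filter ha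
        rw [hk]; exact hkt k' List.mem_cons_self) s]
    exact ih (fun b hb => hkt b (List.mem_cons_of_mem k' hb)) _

theorem pv_groups_append {σ α κ : Type} [BEq κ] [LawfulBEq κ] (f : σ → α → σ) (key : α → κ)
    (hcomm : ∀ s x y, key x ≠ key y → f (f s x) y = f (f s y) x)
    (l : List α) (x : α) (ks : List κ) (hnd : ks.Nodup) (hmem : key x ∈ ks) (s : σ) :
    ks.foldl (fun s k => ((l ++ [x]).filter (fun a => key a == k)).foldl f s) s
      = f (ks.foldl (fun s k => (l.filter (fun a => key a == k)).foldl f s) s) x := by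
  induction ks generalizing s with
  | nil => simp at hmem
  | cons k kt ih =>
    simp only [List.foldl_cons]
    rcases List.mem_cons.mp hmem with hk | hk
    · subst hk
      rw [List.filter_append]
      simp only [List.filter_cons, List.filter_nil, beq_self_eq_true, if_pos, List.foldl_append]
      have hkt : ∀ k' ∈ kt, k' ≠ key x := by
        intro k' hk' he; subst he
        exact (List.nodup_cons.mp hnd).1 hk'
      have hsame : ∀ k' ∈ kt, (l ++ [x]).filter (fun a => key a == k') = l.filter (fun a => key a == k') := by
        intro k' hk'
        rw [List.filter_append]
        simp [Ne.symm (hkt k' hk')]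
      rw [pv_foldl_groups_congr _ (fun s k => (l.filter (fun a => key a == k)).foldl f s) kt
        (fun s0 b hb => by rw [hsame b hb]) _]
      exact pv_groups_comm_out f key hcomm x l kt hkt _
    · have hk0 : k ≠ key x := by
        intro he; subst he
        exact (List.nodup_cons.mp hnd).1 hk
      have hflt : (l ++ [x]).filter (fun a => key a == k) = l.filter (fun a => key a == k) := by
        rw [List.filter_append]; simp [Ne.symm hk0]
      rw [hflt]
      exact ih (List.nodup_cons.mp hnd).2 hk _

theorem pv_foldl_groupBy {σ α κ : Type} [BEq κ] [LawfulBEq κ] (f : σ → α → σ) (key : α → κ)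
    (hcomm : ∀ s x y, key x ≠ key y → f (f s x) y = f (f s y) x)
    (l : List α) (s : σ) :
    l.foldl f s = (PySem.List.dedup (l.map key)).foldl
      (fun s k => (l.filter (fun a => key a == k)).foldl f s) s := by
  induction l using List.reverseRecOn with
  | nil => rfl
  | append_singleton t x ih =>
    rw [List.foldl_append, List.foldl_cons, List.foldl_nil, List.map_append]
    show f (t.foldl f s) x = _
    rw [show (List.map key [x]) = [key x] from rfl, pv_dedup_append]
    by_cases hmem : key x ∈ t.map key
    · rw [if_pos hmem]
      rw [pv_groups_append f key hcomm t x _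
        (by rw [PySem.List.dedup]; exact PySem.Set.nodup_ofList _)
        (by rw [PySem.List.dedup]; exact (PySem.Set.mem_ofList _ _).mpr hmem) s, ih]
    · rw [if_neg hmem, List.foldl_append, List.foldl_cons, List.foldl_nil]
      have hxgrp : (t ++ [x]).filter (fun a => key a == key x) = t.filter (fun a => key a == key x) ++ [x] := by
        rw [List.filter_append]
        simp
      have htflt : t.filter (fun a => key a == key x) = [] := by
        apply List.filter_eq_nil_iff.mpr
        intro a ha hbeq
        exact hmem (List.mem_map.mpr ⟨a, ha, by simpa using hbeq⟩)
      rw [hxgrp, htflt, List.nil_append, List.foldl_cons, List.foldl_nil]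
      rw [pv_foldl_groups_congr _ (fun s k => (t.filter (fun a => key a == k)).foldl f s) _
        (fun s0 b hb => by
          rw [List.filter_append]
          have hbx : (key x == b) = false := by
            have : b ∈ t.map key := by
              have hb' := (PySem.Set.mem_ofList (t.map key) b).mp (by rw [← PySem.List.dedup]; exact hb)
              exact hb'
            simp only [beq_eq_false_iff_ne]
            intro he; subst he; exact hmem this
          simp [hbx]) _]
      rw [ih]

theorem pvTOf_length (h w : Int) (cnt : Int → Int) : (pvTOf h w cnt).length = w.toNat := by
  simp [pvTOf, PySem.List.length_pyRange_one]

theorem pvTOf_get (h w : Int) (cnt : Int → Int) {c : Int} (hc : 0 ≤ c) (hcw : c < w) :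
    PySem.List.pyGetD (pvTOf h w cnt) c 0 = h - 1 - cnt c := by
  rw [PySem.List.pyGetD_eq_getElem _ _ hc (by rw [pvTOf_length]; omega)]
  simp only [pvTOf, List.getElem_map, PySem.List.getElem_pyRange_one]
  have : 0 + (c.toNat : Int) = c := by omega
  rw [this]

theorem pvTOf_update (h w : Int) (cnt : Int → Int) {c : Int} (hc : 0 ≤ c) (_hcw : c < w) :
    (pvTOf h w cnt).set c.toNat (h - 1 - cnt c - 1)
      = pvTOf h w (fun c' => if c' = c then cnt c + 1 else cnt c') := by
  apply List.ext_getElem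
  · simp [pvTOf]
  · intro j hj1 hj2
    rw [List.getElem_set]
    simp only [pvTOf, List.getElem_map, PySem.List.getElem_pyRange_one]
    by_cases hjc : c.toNat = j
    · have hj : 0 + (j : Int) = c := by omega
      rw [if_pos hjc, hj, if_pos rfl]
      ring
    · have hj : ¬ (0 + (j : Int) = c) := by omega
      rw [if_neg hjc, if_neg hj]

theorem pvTOf_zero (h w : Int) : pvTOf h w (fun _ => 0) = List.replicate w.toNat (h - 1) := by
  have : (fun (j : Int) => h - 1 - (fun (_ : Int) => (0:Int)) j) = (fun _ => h - 1) := by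
    funext j; ring
  rw [pvTOf, this, List.map_const', PySem.List.length_pyRange_one]
  congr 1
  omega

theorem pvA_loop (h w : Int) (hh : 0 < h) (hw : 0 < w) (rest : List Int) :
    ∀ (s : Int) (bd : List (List String)) (cnt : Int → Int),
    bd.length = h.toNat →
    (∀ row ∈ bd, row.length = w.toNat) →
    (∀ c, 0 ≤ cnt c) →
    (∀ col ∈ rest, (1 - w ≤ col ∧ col ≤ w) ∧
       cnt (pvKey w col) + (rest.countP (fun c => pvKey w c == pvKey w col) : Int) ≤ 2 * h) →
    (PySem.List.enumerate rest s).foldl pvStepA (bd, pvTOf h w cnt)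
      = ((((PySem.List.enumerate rest s).foldl (pvStep h w) (bd, cnt)).1),
         pvTOf h w (((PySem.List.enumerate rest s).foldl (pvStep h w) (bd, cnt)).2)) := by
  induction rest with
  | nil => intro s bd cnt _ _ _ _; simp [PySem.List.enumerate]
  | cons col rest' ih =>
    intro s bd cnt hlen hrows hcnt hbound
    rw [PySem.List.enumerate_cons, List.foldl_cons, List.foldl_cons]
    have hcol := (hbound col List.mem_cons_self).1
    have hcb := (hbound col List.mem_cons_self).2
    set c := pvKey w col with hc
    have hc0 : 0 ≤ c := PySem.Int.mod_nonneg _ hw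
    have hcw : c < w := PySem.Int.mod_lt _ hw
    have hcnt_ub : cnt c ≤ 2 * h - 1 := by
      have h1 : (0:Int) < (List.countP (fun c0 => pvKey w c0 == c) (col :: rest') : Int) := by
        have : 0 < List.countP (fun c0 => pvKey w c0 == c) (col :: rest') :=
          List.countP_pos_iff.mpr ⟨col, List.mem_cons_self, by simp [hc]⟩
        exact_mod_cast this
      omega
    have hcmod : PySem.Int.mod (col - 1) w = c := by rw [hc, pvKey]
    have hlw : ((pvTOf h w cnt).length : Int) = w := by rw [pvTOf_length]; omega
    have hbl : ((bd.length : Nat) : Int) = h := by omega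
    have hti : PySem.List.pyGetD (pvTOf h w cnt) (col - 1) 0 = h - 1 - cnt c := by
      rw [pvGetD_mod _ _ hlw (by omega) (by omega), hcmod]
      exact pvTOf_get h w cnt hc0 hcw
    have hr1 : -h ≤ h - 1 - cnt c := by have := hcnt c; omega
    have hr2 : h - 1 - cnt c < h := by have := hcnt c; omega
    have hstep : pvStepA (bd, pvTOf h w cnt) (s, col)
        = ((pvStep h w (bd, cnt) (s, col)).1, pvTOf h w ((pvStep h w (bd, cnt) (s, col)).2)) := by
      unfold pvStepA pvStep
      simp only [← hc, hti]
      refine Prod.ext ?_ ?_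
      · dsimp only
        rw [pvSetD_mod bd _ hbl hr1 hr2, pvGetD_mod bd _ hbl hr1 hr2]
        have hrowmem : PySem.List.pyGetD bd (PySem.Int.mod (h - 1 - cnt c) h) [] ∈ bd := by
          apply PySem.List.pyGetD_mem
          constructor
          · have := PySem.Int.mod_nonneg (h - 1 - cnt c) hh; omega
          · have := PySem.Int.mod_lt (h - 1 - cnt c) hh; omega
        have hrl : ((PySem.List.pyGetD bd (PySem.Int.mod (h - 1 - cnt c) h) []).length : Int) = w := by
          rw [hrows _ hrowmem]; omega
        rw [pvSetD_mod _ _ hrl (by omega) (by omega), hcmod]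
        simp only [pvWr, pvPly]
      · dsimp only
        rw [pvSetD_mod _ _ hlw (by omega) (by omega), hcmod,
            PySem.List.pySetD_of_nonneg _ _ hc0]
        exact pvTOf_update h w cnt hc0 hcw
    rw [hstep]
    rcases hX : pvStep h w (bd, cnt) (s, col) with ⟨bd1, cnt1⟩
    have hbd1 : bd1 = pvWr bd (PySem.Int.mod (h - 1 - cnt c) h) c (pvPly s) := by
      have := congrArg Prod.fst hX; simpa [pvStep, ← hc] using this.symm
    have hcnt1 : cnt1 = fun c' => if c' = c then cnt c + 1 else cnt c' := by
      have := congrArg Prod.snd hX; simpa [pvStep, ← hc] using this.symm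
    simp only
    apply ih (s+1) bd1 cnt1
    · rw [hbd1, pvWr]
      rw [PySem.List.length_pySetD]; exact hlen
    · intro row hrow
      rw [hbd1, pvWr, PySem.List.pySetD_of_nonneg _ _ (PySem.Int.mod_nonneg _ hh)] at hrow
      rcases List.mem_or_eq_of_mem_set hrow with hmem | heq
      · exact hrows row hmem
      · rw [heq, PySem.List.length_pySetD]
        apply hrows
        apply PySem.List.pyGetD_mem
        constructor
        · have := PySem.Int.mod_nonneg (h - 1 - cnt c) hh; omega
        · have := PySem.Int.mod_lt (h - 1 - cnt c) hh; omega
    · intro c'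
      simp only [hcnt1]
      by_cases hcc : c' = c
      · rw [if_pos hcc]; have := hcnt c; omega
      · rw [if_neg hcc]; exact hcnt c'
    · intro col' hcol'
      refine ⟨(hbound col' (List.mem_cons_of_mem col hcol')).1, ?_⟩
      have hb := (hbound col' (List.mem_cons_of_mem col hcol')).2
      have hsplit : (List.countP (fun c0 => pvKey w c0 == pvKey w col') (col :: rest') : Int)
          = (List.countP (fun c0 => pvKey w c0 == pvKey w col') rest' : Int)
            + (if pvKey w col = pvKey w col' then 1 else 0) := by
        rw [List.countP_cons]
        by_cases hkk : pvKey w col = pvKey w col'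
        · rw [if_pos hkk]; simp [hkk]
        · rw [if_neg hkk]; simp [hkk]
      simp only [hcnt1]
      by_cases hkk : pvKey w col' = c
      · rw [if_pos hkk]
        rw [hkk] at hb hsplit ⊢
        rw [if_pos (by rw [hc])] at hsplit
        omega
      · rw [if_neg hkk]
        rw [if_neg (by intro he; exact hkk (by rw [← he, hc]))] at hsplit
        omega

theorem pv_group_fold (h w c : Int) (G : List (Int × Int)) (hg : ∀ x ∈ G, pvKey w x.2 = c) :
    ∀ (s : List (List String) × (Int → Int)),
    G.foldl (pvStep h w) s
      = ((PySem.List.enumerate (G.map (fun x => pvPly x.1)) (s.2 c)).foldl (pvFill h c) s.1,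
         fun c' => if c' = c then s.2 c + G.length else s.2 c') := by
  induction G with
  | nil =>
    intro s
    refine Prod.ext rfl ?_
    funext c'
    by_cases hcc : c' = c
    · subst hcc; simp
    · simp [hcc]
  | cons x G' ih =>
    intro s
    rw [List.foldl_cons, List.map_cons, PySem.List.enumerate_cons, List.foldl_cons]
    have hx : pvKey w x.2 = c := hg x List.mem_cons_self
    have hstep : pvStep h w s x
        = (pvFill h c s.1 (s.2 c, pvPly x.1), fun c' => if c' = c then s.2 c + 1 else s.2 c') := by
      unfold pvStep pvFill
      rw [hx]
    rw [hstep, ih (fun b hb => hg b (List.mem_cons_of_mem x hb))]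
    refine Prod.ext ?_ ?_
    · dsimp only
      rw [if_pos rfl]
    · dsimp only
      funext c'
      by_cases hcc : c' = c
      · rw [if_pos hcc, if_pos hcc, if_pos rfl]
        simp only [List.length_cons]
        push_cast
        ring
      · rw [if_neg hcc, if_neg hcc, if_neg hcc]

theorem pv_outer (h w : Int) (E : List (Int × Int)) (ks : List Int) :
    ∀ (s : List (List String) × (Int → Int)), ks.Nodup → (∀ c ∈ ks, s.2 c = 0) →
    (ks.foldl (fun s c => ((E.filter (fun a => pvKey w a.2 == c)).foldl (pvStep h w) s)) s).1
      = ks.foldl (fun bd c =>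
          (PySem.List.enumerate ((E.filter (fun a => pvKey w a.2 == c)).map (fun x => pvPly x.1)) 0).foldl
            (pvFill h c) bd) s.1 := by
  induction ks with
  | nil => intro s _ _; rfl
  | cons c kt ih =>
    intro s hnd hz
    rw [List.foldl_cons, List.foldl_cons]
    have hg : ∀ x ∈ E.filter (fun a => pvKey w a.2 == c), pvKey w x.2 = c := by
      intro x hx
      simpa using List.of_mem_filter hx
    rw [pv_group_fold h w c _ hg s, hz c List.mem_cons_self]
    apply ih
    · exact (List.nodup_cons.mp hnd).2
    · intro c' hc'
      dsimp only
      rw [if_neg (by intro he; subst he; exact (List.nodup_cons.mp hnd).1 hc')]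
      exact hz c' (List.mem_cons_of_mem c hc')

-- B as a grouped fill over the raw (un-resolved) column indices
theorem pvB_eq (h w : Int) (game : List Int) :
    generate_game_board_from_game_alt h w game
      = (PySem.List.dedup ((PySem.List.enumerate game 0).map (fun a => a.2 - 1))).foldl
          (fun bd c =>
            (PySem.List.enumerate
              (((PySem.List.enumerate game 0).filter (fun a => a.2 - 1 == c)).map
                (fun x => pvPly x.1)) 0).foldl (pvFill' h c) bd)
          (List.replicate h.toNat (List.replicate w.toNat "0")) := by
  set E := PySem.List.enumerate game 0 with hE
  set mv : Int × Int → Int × String := (fun x => (x.2 - 1, pvPly x.1)) with hmv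
  set columns := (E.map mv).foldl
    (fun (d : PySem.Dict Int (List String)) p => d.modify p.1 [] (· ++ [p.2]))
    PySem.Dict.empty with hcolsdef
  have hstart : generate_game_board_from_game_alt h w game
      = columns.items.foldl
          (fun bd ct => (PySem.List.enumerate ct.2 0).foldl (pvFill' h ct.1) bd)
          (List.replicate h.toNat (List.replicate w.toNat "0")) := by
    rw [hcolsdef, List.foldl_map]
    rfl
  rw [hstart]
  have hkeys : columns.keys = PySem.List.dedup (E.map (fun a => a.2 - 1)) := by
    rw [hcolsdef, PySem.Dict.keys_foldl_modify_key (E.map mv) (fun p => p.1) []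
      (fun d p => (· ++ [p.2])) PySem.Dict.empty]
    rw [PySem.Dict.keys_empty, PySem.Set.update_nil_left, List.map_map,
        PySem.List.dedup_eq_ofList]
    rfl
  have hnd : columns.keys.Nodup := by
    rw [hcolsdef]
    exact PySem.Dict.nodup_keys_foldl_modify_key _ _ _ _ _ PySem.Dict.nodup_keys_empty
  have hget : ∀ c : Int, columns.getD c []
      = ((E.filter (fun a => a.2 - 1 == c)).map (fun x => pvPly x.1)) := by
    intro c
    rw [hcolsdef, PySem.Dict.getD_foldl_modify_append (E.map mv) PySem.Dict.empty c,
        PySem.Dict.getD_empty, List.nil_append, List.filter_map, List.map_map]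
    rfl
  rw [PySem.Dict.items_eq_map_keys columns hnd [], List.foldl_map, hkeys]
  apply pv_foldl_groups_congr
  intro bd c hc
  rw [hget c]

-- dedup commutes with a map that is injective on the list's members
theorem pv_dedup_map (m : Int → Int) :
    ∀ (l : List Int), (∀ a ∈ l, ∀ b ∈ l, m a = m b → a = b) →
    PySem.List.dedup (l.map m) = (PySem.List.dedup l).map m := by
  intro l
  induction l using List.reverseRecOn with
  | nil => intro _; rfl
  | append_singleton t x ih =>
    intro hinj
    rw [List.map_append, show List.map m [x] = [m x] from rfl,
        pv_dedup_append, pv_dedup_append]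
    have hmx : m x ∈ t.map m ↔ x ∈ t := by
      constructor
      · intro hm
        obtain ⟨a, ha, hma⟩ := List.mem_map.mp hm
        have := hinj a (List.mem_append_left _ ha) x
          (List.mem_append_right _ List.mem_cons_self) hma
        rwa [← this]
      · intro hx; exact List.mem_map.mpr ⟨x, hx, rfl⟩
    have iht := ih (fun a ha b hb => hinj a (List.mem_append_left _ ha) b (List.mem_append_left _ hb))
    by_cases hx : x ∈ t
    · rw [if_pos (hmx.mpr hx), if_pos hx, iht]
    · rw [if_neg (fun hm => hx (hmx.mp hm)), if_neg hx, List.map_append, iht]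
      rfl

-- a fold congruence that carries an invariant of the accumulator
theorem pv_foldl_congr_inv {α β : Type} (P : β → Prop) (f g : β → α → β) (l : List α)
    (hfg : ∀ b a, a ∈ l → P b → f b a = g b a)
    (hP : ∀ b a, a ∈ l → P b → P (f b a)) :
    ∀ b, P b → l.foldl f b = l.foldl g b := by
  induction l with
  | nil => intro b _; rfl
  | cons a t ih =>
    intro b hb
    simp only [List.foldl_cons]
    rw [← hfg b a List.mem_cons_self hb]
    exact ih (fun b' a' ha' => hfg b' a' (List.mem_cons_of_mem a ha'))
      (fun b' a' ha' => hP b' a' (List.mem_cons_of_mem a ha'))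
      (f b a) (hP b a List.mem_cons_self hb)

-- an in-range write equals the write at the resolved (mod) indices
theorem pvWr_mod {h w : Int} (hh : 0 < h) (hw : 0 < w) (bd : List (List String))
    (hs : pvShape h w bd) {r c : Int} (p : String)
    (hr1 : -h ≤ r) (hr2 : r < h) (hc1 : -w ≤ c) (hc2 : c < w) :
    pvWr bd r c p = pvWr bd (PySem.Int.mod r h) (PySem.Int.mod c w) p := by
  have hbl : ((bd.length : Nat) : Int) = h := by rw [hs.1]; omega
  unfold pvWr
  rw [pvSetD_mod bd _ hbl hr1 hr2, pvGetD_mod bd _ hbl hr1 hr2]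
  have hrowmem : PySem.List.pyGetD bd (PySem.Int.mod r h) [] ∈ bd := by
    apply PySem.List.pyGetD_mem
    constructor
    · have := PySem.Int.mod_nonneg r hh; omega
    · have := PySem.Int.mod_lt r hh; omega
  have hrl : ((PySem.List.pyGetD bd (PySem.Int.mod r h) []).length : Int) = w := by
    rw [hs.2 _ hrowmem]; omega
  rw [pvSetD_mod _ _ hrl hc1 hc2]

-- an in-range write preserves the board shape
theorem pvWr_shape {h w : Int} (hh : 0 < h) (hw : 0 < w) (bd : List (List String))
    (hs : pvShape h w bd) {r c : Int} (p : String)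
    (hr1 : -h ≤ r) (hr2 : r < h) (hc1 : -w ≤ c) (hc2 : c < w) :
    pvShape h w (pvWr bd r c p) := by
  have hbl : ((bd.length : Nat) : Int) = h := by rw [hs.1]; omega
  rw [pvWr_mod hh hw bd hs p hr1 hr2 hc1 hc2]
  constructor
  · rw [pvWr, PySem.List.length_pySetD]; exact hs.1
  · intro row hrow
    rw [pvWr, PySem.List.pySetD_of_nonneg _ _ (PySem.Int.mod_nonneg _ hh)] at hrow
    rcases List.mem_or_eq_of_mem_set hrow with hmem | heq
    · exact hs.2 row hmem
    · rw [heq, PySem.List.length_pySetD]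
      apply hs.2
      apply PySem.List.pyGetD_mem
      constructor
      · have := PySem.Int.mod_nonneg r hh; omega
      · have := PySem.Int.mod_lt r hh; omega

theorem pvA_eq (h w : Int) (game : List Int) (hh : 0 < h) (hw : 0 < w)
    (hpre : ∀ col ∈ game, (1 - w ≤ col ∧ col ≤ w) ∧
      ((game.countP (fun c => PySem.Int.mod (c - 1) w == PySem.Int.mod (col - 1) w) : Int) ≤ 2 * h)) :
    generate_game_board_from_game h w game
      = ((PySem.List.enumerate game 0).foldl (pvStep h w)
          (List.replicate h.toNat (List.replicate w.toNat "0"), fun _ => 0)).1 := by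
  have h0 : generate_game_board_from_game h w game
      = ((PySem.List.enumerate game 0).foldl pvStepA
          (List.replicate h.toNat (List.replicate w.toNat "0"),
           List.replicate w.toNat (h - 1))).1 := rfl
  rw [h0, ← pvTOf_zero h w]
  rw [pvA_loop h w hh hw game 0 _ _ (by simp)
        (fun row hr => by rw [List.eq_of_mem_replicate hr]; simp)
        (fun c => le_refl 0)
        (fun col hcol => ⟨(hpre col hcol).1, by
          have h2 := (hpre col hcol).2
          simp only [pvKey]
          omega⟩)]

-- a fold preserves an invariant of the accumulator
theorem pv_foldl_pres {α β : Type} (P : β → Prop) (f : β → α → β) (l : List α)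
    (hP : ∀ b a, a ∈ l → P b → P (f b a)) :
    ∀ b, P b → P (l.foldl f b) := by
  induction l with
  | nil => intro b hb; exact hb
  | cons a t ih =>
    intro b hb
    exact ih (fun b' a' ha' => hP b' a' (List.mem_cons_of_mem a ha'))
      (f b a) (hP b a List.mem_cons_self hb)

-- one resolved-column fill step preserves the board shape
theorem pvFill_shape {h w : Int} (hh : 0 < h) (hw : 0 < w) {c : Int}
    (hc1 : 0 ≤ c) (hc2 : c < w) (bd : List (List String)) (hs : pvShape h w bd)
    (kp : Int × String) : pvShape h w (pvFill h c bd kp) := by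
  unfold pvFill
  exact pvWr_shape hh hw bd hs kp.2
    (by have := PySem.Int.mod_nonneg (h - 1 - kp.1) hh; omega)
    (PySem.Int.mod_lt _ hh) (by omega) hc2

-- filling a short-enough column at the resolved index equals filling it at the raw index
theorem pv_inner_eq {h w : Int} (hh : 0 < h) (hw : 0 < w) {c : Int}
    (hc1 : -w ≤ c) (hc2 : c < w) (tokens : List String)
    (hlen : (tokens.length : Int) ≤ 2 * h) (bd : List (List String)) (hs : pvShape h w bd) :
    (PySem.List.enumerate tokens 0).foldl (pvFill h (PySem.Int.mod c w)) bd
      = (PySem.List.enumerate tokens 0).foldl (pvFill' h c) bd := by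
  refine pv_foldl_congr_inv (pvShape h w) _ _ _ ?_ ?_ bd hs
  · intro b kp hkp hb
    obtain ⟨k, hk, hkp'⟩ := (PySem.List.mem_enumerate_iff _ _ _).mp hkp
    have hkp1 : kp.1 = (k : Int) := by rw [hkp']; simp
    have hkl : (k : Int) < (tokens.length : Int) := by exact_mod_cast hk
    unfold pvFill pvFill'
    rw [← pvWr_mod hh hw b hb kp.2 (by omega) (by omega) hc1 hc2]
  · intro b kp hkp hb
    exact pvFill_shape hh hw (PySem.Int.mod_nonneg c hw) (PySem.Int.mod_lt c hw) b hb kp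

-- ===== VERDICT (by name: the statement is the Claim_ definition above) =====
theorem generate_game_board_from_game_spec : Claim_equal_generate_game_board_from_game := by
  intro h w game hdom hpre
  unfold Spec_generate_game_board_from_game
  obtain ⟨hpre1, hpre2⟩ := hpre
  rcases eq_or_ne game [] with hg | hg
  · subst hg; rfl
  · obtain ⟨col0, hcol0⟩ := List.exists_mem_of_ne_nil game hg
    have hw : 0 < w := by have := (hpre1 col0 hcol0).1; omega
    have hh : 0 < h := by
      have h2 := (hpre1 col0 hcol0).2
      have h1 : 0 < List.countP
          (fun c => PySem.Int.mod (c - 1) w == PySem.Int.mod (col0 - 1) w) game :=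
        List.countP_pos_iff.mpr ⟨col0, hcol0, by simp⟩
      have h1' : (0:Int) < (List.countP
          (fun c => PySem.Int.mod (c - 1) w == PySem.Int.mod (col0 - 1) w) game : Int) := by
        exact_mod_cast h1
      omega
    set E := PySem.List.enumerate game 0 with hE
    set L := E.map (fun a => a.2 - 1) with hL
    have hmemgame : ∀ a ∈ E, a.2 ∈ game := by
      intro a ha
      obtain ⟨k, hk, hak⟩ := (PySem.List.mem_enumerate_iff _ _ _).mp ha
      rw [hak]
      exact List.getElem_mem hk
    have hmemL : ∀ x ∈ L, ∃ col ∈ game, col - 1 = x := by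
      intro x hx
      obtain ⟨a, ha, hax⟩ := List.mem_map.mp hx
      exact ⟨a.2, hmemgame a ha, hax⟩
    have hinj : ∀ x ∈ L, ∀ y ∈ L, PySem.Int.mod x w = PySem.Int.mod y w → x = y := by
      intro x hx y hy hm
      obtain ⟨c1, hc1, rfl⟩ := hmemL x hx
      obtain ⟨c2, hc2, rfl⟩ := hmemL y hy
      have hb1 := (hpre1 c1 hc1).1
      have hb2 := (hpre1 c2 hc2).1
      rw [pv_mod_resolve hw (by omega) (by omega),
          pv_mod_resolve hw (by omega) (by omega)] at hm
      by_cases h1 : 0 ≤ c1 - 1 <;> by_cases h2 : 0 ≤ c2 - 1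
      · rw [if_pos h1, if_pos h2] at hm; omega
      · rw [if_pos h1, if_neg h2] at hm
        exfalso
        apply hpre2 c2 hc2 (by omega)
        have hcc : c2 + w = c1 := by omega
        rw [hcc]; exact hc1
      · rw [if_neg h1, if_pos h2] at hm
        exfalso
        apply hpre2 c1 hc1 (by omega)
        have hcc : c1 + w = c2 := by omega
        rw [hcc]; exact hc2
      · rw [if_neg h1, if_neg h2] at hm; omega
    have hcount : ∀ x ∈ L, ((E.filter (fun a => a.2 - 1 == x)).length : Int) ≤ 2 * h := by
      intro x hx
      obtain ⟨c1, hc1, rfl⟩ := hmemL x hx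
      have hb := (hpre1 c1 hc1).2
      have hmono : (E.filter (fun a => a.2 - 1 == c1 - 1)).length
          ≤ E.countP (fun a => PySem.Int.mod (a.2 - 1) w == PySem.Int.mod (c1 - 1) w) := by
        rw [← List.countP_eq_length_filter]
        apply List.countP_mono_left
        intro a ha hp
        have hax : a.2 - 1 = c1 - 1 := by simpa using hp
        simp [hax]
      have hcg : E.countP (fun a => PySem.Int.mod (a.2 - 1) w == PySem.Int.mod (c1 - 1) w)
          = game.countP (fun c => PySem.Int.mod (c - 1) w == PySem.Int.mod (c1 - 1) w) := by
        conv_rhs => rw [← PySem.List.map_snd_enumerate game 0]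
        rw [List.countP_map]
        rfl
      rw [hcg] at hmono
      have hmono' : ((E.filter (fun a => a.2 - 1 == c1 - 1)).length : Int)
          ≤ (game.countP (fun c => PySem.Int.mod (c - 1) w == PySem.Int.mod (c1 - 1) w) : Int) := by
        exact_mod_cast hmono
      omega
    rw [pvA_eq h w game hh hw hpre1, pvB_eq h w game]
    rw [pv_foldl_groupBy (pvStep h w) (fun a => pvKey w a.2)
          (fun s x y hne => pvStep_comm h w hh hw s x y hne) E _]
    rw [pv_outer h w E _ _ (PySem.List.nodup_dedup _) (fun c _ => rfl)]
    have hks : PySem.List.dedup (E.map (fun a => pvKey w a.2))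
        = (PySem.List.dedup L).map (fun c => PySem.Int.mod c w) := by
      have h1 : E.map (fun a => pvKey w a.2) = L.map (fun c => PySem.Int.mod c w) := by
        rw [hL, List.map_map]; rfl
      rw [h1, pv_dedup_map _ L hinj]
    rw [hks, List.foldl_map]
    refine pv_foldl_congr_inv (pvShape h w) _ _ _ ?_ ?_ _ ?_
    · intro bd c hc hbd
      have hcL : c ∈ L := (PySem.List.mem_dedup _ _).mp hc
      obtain ⟨c1, hc1, hc1e⟩ := hmemL c hcL
      have hcb1 : -w ≤ c := by have := (hpre1 c1 hc1).1; omega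
      have hcb2 : c < w := by have := (hpre1 c1 hc1).1; omega
      have hfe : E.filter (fun a => pvKey w a.2 == PySem.Int.mod c w)
          = E.filter (fun a => a.2 - 1 == c) := by
        apply List.filter_congr
        intro a ha
        have haL : a.2 - 1 ∈ L := List.mem_map.mpr ⟨a, ha, rfl⟩
        by_cases he : a.2 - 1 = c
        · simp [pvKey, he]
        · have hne : PySem.Int.mod (a.2 - 1) w ≠ PySem.Int.mod c w :=
            fun hmm => he (hinj _ haL _ hcL hmm)
          simp only [pvKey]
          simp [he, hne]
      show (PySem.List.enumerate
            ((E.filter (fun a => pvKey w a.2 == PySem.Int.mod c w)).map (fun x => pvPly x.1)) 0).foldl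
          (pvFill h (PySem.Int.mod c w)) bd
        = (PySem.List.enumerate
            ((E.filter (fun a => a.2 - 1 == c)).map (fun x => pvPly x.1)) 0).foldl
          (pvFill' h c) bd
      rw [hfe]
      exact pv_inner_eq hh hw hcb1 hcb2 _
        (by rw [List.length_map]; exact hcount c hcL) bd hbd
    · intro bd c hc hbd
      exact pv_foldl_pres (pvShape h w) _ _
        (fun b a _ hb => pvFill_shape hh hw (PySem.Int.mod_nonneg c hw)
          (PySem.Int.mod_lt c hw) b hb a) bd hbd
    · constructor
      · simp
      · intro row hrow
        rw [List.eq_of_mem_replicate hrow]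
        simp
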